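-- pv_equiv track=rewrite | github.com/leefbiant/autoremove | webapp/remover.py | merge_boxes
-- ===== SOURCE A (Python) =====
-- from typing import Dict, List, Optional, Sequence, Tuple
--
-- Box = Tuple[int, int, int, int]
--
-- def merge_boxes(boxes: Sequence[Box]) -> Optional[Box]:
--     if not boxes:
--         return None
--     return (
--         min(b[0] for b in boxes),
--         min(b[1] for b in boxes),
--         max(b[2] for b in boxes),
--         max(b[3] for b in boxes),
--     )
-- ===== SOURCE B (Python) =====
-- from typing import Optional, Sequence, Tuple
--
-- Box = Tuple[int, int, int, int]
--
-- def merge_boxes(boxes: Sequence[Box]) -> Optional[Box]: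
--     if not boxes:
--         return None
--     min_x0, min_y1, max_x2, max_y3 = boxes[0]
--     for x0, y1, x2, y3 in boxes[1:]:
--         if x0 < min_x0:
--             min_x0 = x0
--         if y1 < min_y1:
--             min_y1 = y1
--         if x2 > max_x2:
--             max_x2 = x2
--         if y3 > max_y3:
--             max_y3 = y3
--     return (min_x0, min_y1, max_x2, max_y3)
-- ===== Notes on version B (the rewrite author's own statement) =====
-- stated objective: alternative
-- what changed: Replaces four independent generator scans (one per component) with a single fused pass maintaining four running extrema.
import Mathlib
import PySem

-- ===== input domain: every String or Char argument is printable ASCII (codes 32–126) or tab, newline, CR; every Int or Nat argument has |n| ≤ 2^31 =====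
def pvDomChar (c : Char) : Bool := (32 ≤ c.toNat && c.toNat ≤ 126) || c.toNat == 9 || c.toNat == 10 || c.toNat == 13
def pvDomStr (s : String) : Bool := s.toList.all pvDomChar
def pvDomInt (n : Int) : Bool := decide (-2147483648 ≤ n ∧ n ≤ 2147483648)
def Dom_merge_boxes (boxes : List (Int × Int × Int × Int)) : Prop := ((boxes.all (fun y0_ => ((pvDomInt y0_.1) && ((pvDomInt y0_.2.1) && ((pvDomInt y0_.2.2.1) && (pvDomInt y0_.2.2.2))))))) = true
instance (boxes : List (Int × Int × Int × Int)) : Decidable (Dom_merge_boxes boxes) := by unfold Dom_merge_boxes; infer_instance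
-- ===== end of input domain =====

-- B fuses A's four independent component scans into one pass with four running extrema (same O(n) cost, a single traversal).

-- ===== PORT A =====
-- A: empty guard, then four independent min/max scans over the component generators.
def merge_boxes (boxes : List (Int × Int × Int × Int)) : Option (Int × Int × Int × Int) :=
  match boxes with
  | [] => none
  | b :: t =>
    match PySem.List.min? ((b :: t).map (·.1)) (fun x => x),
          PySem.List.min? ((b :: t).map (·.2.1)) (fun x => x),
          PySem.List.max? ((b :: t).map (·.2.2.1)) (fun x => x),
          PySem.List.max? ((b :: t).map (·.2.2.2)) (fun x => x) with
    | some a, some c, some d, some e => some (a, c, d, e)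
    | _, _, _, _ => none

-- ===== PORT B =====
-- B: single fold over the tail maintaining four running extrema seeded from boxes[0].
def merge_boxes_alt (boxes : List (Int × Int × Int × Int)) : Option (Int × Int × Int × Int) :=
  match boxes with
  | [] => none
  | b :: rest =>
    some (rest.foldl
      (fun acc c =>
        (if c.1 < acc.1 then c.1 else acc.1,
         if c.2.1 < acc.2.1 then c.2.1 else acc.2.1,
         if c.2.2.1 > acc.2.2.1 then c.2.2.1 else acc.2.2.1,
         if c.2.2.2 > acc.2.2.2 then c.2.2.2 else acc.2.2.2)) b)

-- ===== PRECONDITION & SPEC =====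
def Spec_merge_boxes (boxes : List (Int × Int × Int × Int)) (out : Option (Int × Int × Int × Int)) : Prop := out = merge_boxes_alt boxes
instance (boxes : List (Int × Int × Int × Int)) (out : Option (Int × Int × Int × Int)) : Decidable (Spec_merge_boxes boxes out) := by unfold Spec_merge_boxes; infer_instance

-- ===== CLAIM (what is proved, stated in full; the proofs are below) =====
def Claim_equal_merge_boxes : Prop := ∀ (boxes : List (Int × Int × Int × Int)), Dom_merge_boxes boxes → Spec_merge_boxes boxes (merge_boxes boxes)

-- ===== LEMMAS AND PROOFS =====

-- the fused fold computes the four component folds simultaneously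
theorem fused_fold_eq (t : List (Int × Int × Int × Int)) (b : Int × Int × Int × Int) :
    t.foldl
      (fun acc c =>
        (if c.1 < acc.1 then c.1 else acc.1,
         if c.2.1 < acc.2.1 then c.2.1 else acc.2.1,
         if c.2.2.1 > acc.2.2.1 then c.2.2.1 else acc.2.2.1,
         if c.2.2.2 > acc.2.2.2 then c.2.2.2 else acc.2.2.2)) b
    = ((t.map (·.1)).foldl min b.1,
       (t.map (·.2.1)).foldl min b.2.1,
       (t.map (·.2.2.1)).foldl max b.2.2.1,
       (t.map (·.2.2.2)).foldl max b.2.2.2) := by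
  induction t generalizing b with
  | nil => rfl
  | cons c t ih =>
    simp only [List.foldl_cons, List.map_cons, ih]
    have h1 : (if c.1 < b.1 then c.1 else b.1) = min b.1 c.1 := by rw [min_def]; split_ifs <;> omega
    have h2 : (if c.2.1 < b.2.1 then c.2.1 else b.2.1) = min b.2.1 c.2.1 := by rw [min_def]; split_ifs <;> omega
    have h3 : (if c.2.2.1 > b.2.2.1 then c.2.2.1 else b.2.2.1) = max b.2.2.1 c.2.2.1 := by rw [max_def]; split_ifs <;> omega
    have h4 : (if c.2.2.2 > b.2.2.2 then c.2.2.2 else b.2.2.2) = max b.2.2.2 c.2.2.2 := by rw [max_def]; split_ifs <;> omega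
    rw [h1, h2, h3, h4]

-- ===== VERDICT (by name: the statement is the Claim_ definition above) =====
theorem merge_boxes_spec : Claim_equal_merge_boxes := by
  intro boxes _
  unfold Spec_merge_boxes merge_boxes merge_boxes_alt
  cases boxes with
  | nil => rfl
  | cons b t =>
    simp only [List.map_cons, PySem.List.min?_id_cons, PySem.List.max?_id_cons, fused_fold_eq]
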